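-- pv_equiv track=rewrite | github.com/AleVlaKon/algorytm | 8/8.3.17.py | get_sections_indices
-- ===== SOURCE A (Python) =====
-- def get_sections_indices(lst):
--     sections = []
--     i = 0
--     n = len(lst)
--     while i < n:
--         # пропускаем нули
--         if lst[i] == 0:
--             i += 1
--             continue
--         # нашли начало секции
--         start = i
--         # идём до конца секции (пока не встретим ноль или конец списка)
--         while i < n and lst[i] != 0:
--             i += 1
--         end = i  # последний элемент секции
--         sections.append((start, end))
--     return sections
-- ===== SOURCE B (Python) =====
-- def get_sections_indices(lst):
--     # Edge detection: a section starts where a non-zero follows a zero (with a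
--     # virtual zero before the list) and ends after a non-zero followed by a zero
--     # (with a virtual zero after the list); pair the two boundary lists up.
--     starts = [i for i, (p, x) in enumerate(zip([0] + lst, lst)) if x != 0 and p == 0]
--     ends = [i + 1 for i, (x, q) in enumerate(zip(lst, lst[1:] + [0])) if x != 0 and q == 0]
--     return list(zip(starts, ends))
-- ===== Notes on version B (the rewrite author's own statement) =====
-- stated objective: alternative
-- what changed: Replaces A's manual index walk with nested while loops by boundary detection: two filtered passes over zero-padded shifted zips collect the start indices (zero-to-nonzero edges) and exclusive end indices (nonzero-to-zero edges), which are then paired with zip.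
import Mathlib
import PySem

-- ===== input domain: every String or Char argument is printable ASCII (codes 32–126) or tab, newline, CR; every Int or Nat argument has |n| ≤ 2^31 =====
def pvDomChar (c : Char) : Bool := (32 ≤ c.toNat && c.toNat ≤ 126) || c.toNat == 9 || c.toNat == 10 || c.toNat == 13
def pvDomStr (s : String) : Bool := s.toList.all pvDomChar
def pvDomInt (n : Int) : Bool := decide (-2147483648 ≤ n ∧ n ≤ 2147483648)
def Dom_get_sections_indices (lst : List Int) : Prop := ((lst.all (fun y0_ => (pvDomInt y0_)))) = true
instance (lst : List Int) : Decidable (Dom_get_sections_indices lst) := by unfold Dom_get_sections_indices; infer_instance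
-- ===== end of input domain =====

-- B replaces A's index walk (skip zeros, then an inner while over the run) by boundary
-- detection on zero→non-zero / non-zero→zero edges of zero-padded shifted zips, pairing
-- the start list with the end list (alternative decomposition, same O(n) cost).

-- ===== PORT A =====
-- inner while loop of A: advance i while i < n and lst[i] != 0; returns (final i, remaining list)
def pvScanA : List Int → Int → Int × List Int
  | [], i => (i, [])
  | x :: xs, i => if x = 0 then (i, x :: xs) else pvScanA xs (i + 1)

theorem pvScanA_len : ∀ (l : List Int) (i : Int), (pvScanA l i).2.length ≤ l.length
  | [], _ => by simp [pvScanA]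
  | x :: xs, i => by
    by_cases h : x = 0
    · simp [pvScanA, h]
    · simp only [pvScanA, if_neg h]
      exact le_trans (pvScanA_len xs (i + 1)) (by simp)

-- outer while loop of A
def pvLoopA (l : List Int) (i : Int) : List (Int × Int) :=
  match l with
  | [] => []
  | x :: xs =>
    if x = 0 then pvLoopA xs (i + 1)
    else
      let p := pvScanA (x :: xs) i
      (i, p.1) :: pvLoopA p.2 p.1
termination_by l.length
decreasing_by
  · simp
  · rename_i h
    simp only [pvScanA, if_neg h]
    exact Nat.lt_succ_of_le (pvScanA_len xs (i + 1))

def get_sections_indices (lst : List Int) : List (Int × Int) := pvLoopA lst 0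

-- ===== PORT B =====
-- starts = [i for i, (p, x) in enumerate(zip([0] + lst, lst)) if x != 0 and p == 0]
-- ends   = [i + 1 for i, (x, q) in enumerate(zip(lst, lst[1:] + [0])) if x != 0 and q == 0]
-- return list(zip(starts, ends))
def get_sections_indices_alt (lst : List Int) : List (Int × Int) :=
  let starts := (PySem.List.enumerate ((0 :: lst).zip lst) 0).filterMap
    (fun p => if p.2.2 ≠ 0 ∧ p.2.1 = 0 then some p.1 else none)
  let ends := (PySem.List.enumerate (lst.zip (PySem.List.slice lst (some 1) none ++ [0])) 0).filterMap
    (fun p => if p.2.1 ≠ 0 ∧ p.2.2 = 0 then some (p.1 + 1) else none)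
  starts.zip ends

-- ===== PRECONDITION & SPEC =====
def Spec_get_sections_indices (lst : List Int) (out : List (Int × Int)) : Prop := out = get_sections_indices_alt lst
instance (lst : List Int) (out : List (Int × Int)) : Decidable (Spec_get_sections_indices lst out) := by unfold Spec_get_sections_indices; infer_instance

-- ===== CLAIM (what is proved, stated in full; the proofs are below) =====
def Claim_equal_get_sections_indices : Prop := ∀ (lst : List Int), Dom_get_sections_indices lst → Spec_get_sections_indices lst (get_sections_indices lst)

-- ===== LEMMAS AND PROOFS =====

-- recursive characterisation of B's start list (prev element carried along)
def pvStartsRec : Int → List Int → Int → List Int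
  | _, [], _ => []
  | p, x :: xs, i => if x ≠ 0 ∧ p = 0 then i :: pvStartsRec x xs (i + 1) else pvStartsRec x xs (i + 1)

-- recursive characterisation of B's end list (next element looked ahead)
def pvEndsRec : List Int → Int → List Int
  | [], _ => []
  | x :: xs, i => if x ≠ 0 ∧ xs.headD 0 = 0 then (i + 1) :: pvEndsRec xs (i + 1) else pvEndsRec xs (i + 1)

theorem pvStarts_bridge : ∀ (xs : List Int) (p : Int) (i : Int),
    (PySem.List.enumerate ((p :: xs).zip xs) i).filterMap
      (fun q => if q.2.2 ≠ 0 ∧ q.2.1 = 0 then some q.1 else none)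
    = pvStartsRec p xs i
  | [], p, i => by simp [pvStartsRec, PySem.List.enumerate_nil]
  | x :: xs, p, i => by
    rw [show (p :: x :: xs).zip (x :: xs) = (p, x) :: ((x :: xs).zip xs) from rfl,
        PySem.List.enumerate_cons]
    by_cases h : x ≠ 0 ∧ p = 0 <;>
      simp [h, pvStartsRec, pvStarts_bridge xs x (i + 1)]

theorem pvEnds_bridge : ∀ (xs : List Int) (i : Int),
    (PySem.List.enumerate (xs.zip (xs.tail ++ [0])) i).filterMap
      (fun q => if q.2.1 ≠ 0 ∧ q.2.2 = 0 then some (q.1 + 1) else none)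
    = pvEndsRec xs i
  | [], i => by simp [pvEndsRec, PySem.List.enumerate_nil]
  | [x], i => by
    by_cases h : x ≠ 0 <;>
      simp [PySem.List.enumerate_cons, PySem.List.enumerate_nil, pvEndsRec, h]
  | x :: y :: xs, i => by
    have hb := pvEnds_bridge (y :: xs) (i + 1)
    rw [List.tail_cons] at hb
    rw [show (x :: y :: xs).zip ((x :: y :: xs).tail ++ [0])
          = (x, y) :: ((y :: xs).zip (xs ++ [0])) from rfl,
        PySem.List.enumerate_cons, List.filterMap_cons, hb]
    by_cases h : x ≠ 0 ∧ y = 0 <;> simp [pvEndsRec, h]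

-- the remainder left by the inner scan is empty or begins with a zero
theorem pvScanA_rest : ∀ (xs : List Int) (i : Int),
    (pvScanA xs i).2 = [] ∨ (pvScanA xs i).2.headD 1 = 0
  | [], _ => Or.inl rfl
  | x :: xs, i => by
    by_cases h : x = 0
    · simp [pvScanA, h]
    · simp only [pvScanA, if_neg h]
      exact pvScanA_rest xs (i + 1)

-- when the remainder is empty or begins with a zero, the carried prev is irrelevant
theorem pvStartsRec_indep (xs : List Int) (i p : Int)
    (h : xs = [] ∨ xs.headD 1 = 0) : pvStartsRec p xs i = pvStartsRec 0 xs i := by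
  cases xs with
  | nil => rfl
  | cons x t =>
    rcases h with h | h
    · exact absurd h (by simp)
    · simp only [List.headD_cons] at h
      simp [pvStartsRec, h]

-- during a run (prev non-zero) no start is emitted until the scan's remainder
theorem pvStartsRec_run : ∀ (xs : List Int) (i p : Int), p ≠ 0 →
    pvStartsRec p xs i = pvStartsRec 1 (pvScanA xs i).2 (pvScanA xs i).1
  | [], i, p, _ => by simp [pvScanA, pvStartsRec]
  | x :: xs, i, p, hp => by
    by_cases h : x = 0
    · subst h
      simp [pvScanA, pvStartsRec, hp]
    · simp only [pvScanA, if_neg h, pvStartsRec, if_neg (by tauto : ¬(x ≠ 0 ∧ p = 0))]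
      exact pvStartsRec_run xs (i + 1) x h

-- a run's single end: the scan's final index
theorem pvEndsRec_run : ∀ (t : List Int) (x i : Int), x ≠ 0 →
    pvEndsRec (x :: t) i
      = (pvScanA (x :: t) i).1 :: pvEndsRec (pvScanA (x :: t) i).2 (pvScanA (x :: t) i).1
  | [], x, i, hx => by simp [pvScanA, pvEndsRec, hx]
  | y :: t, x, i, hx => by
    by_cases hy : y = 0
    · subst hy
      simp [pvScanA, pvEndsRec, hx]
    · simp only [pvEndsRec, List.headD_cons, if_neg (by tauto : ¬(x ≠ 0 ∧ y = 0))]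
      simp only [pvScanA, if_neg hx, if_neg hy]
      have := pvEndsRec_run t y (i + 1) hy
      simp only [pvScanA, if_neg hy] at this
      exact this

theorem pvMain : ∀ (n : Nat) (xs : List Int), xs.length ≤ n → ∀ (i : Int),
    (pvStartsRec 0 xs i).zip (pvEndsRec xs i) = pvLoopA xs i := by
  intro n
  induction n with
  | zero =>
    intro xs hxs i
    have : xs = [] := List.eq_nil_of_length_eq_zero (Nat.le_zero.mp hxs)
    subst this
    rw [pvLoopA]; rfl
  | succ n ih =>
    intro xs hxs i
    cases xs with
    | nil => rw [pvLoopA]; rfl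
    | cons x t =>
      rw [pvLoopA]
      by_cases hx : x = 0
      · subst hx
        have h1 : pvStartsRec 0 ((0 : Int) :: t) i = pvStartsRec 0 t (i + 1) := by
          simp [pvStartsRec]
        have h2 : pvEndsRec ((0 : Int) :: t) i = pvEndsRec t (i + 1) := by
          simp [pvEndsRec]
        rw [h1, h2]
        exact ih t (by simpa using hxs) (i + 1)
      · simp only [if_neg hx]
        have hs : pvStartsRec 0 (x :: t) i = i :: pvStartsRec x t (i + 1) := by
          simp [pvStartsRec, hx]
        have hscan : pvScanA (x :: t) i = pvScanA t (i + 1) := by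
          simp [pvScanA, hx]
        rw [hs, pvEndsRec_run t x i hx, hscan]
        rw [List.zip_cons_cons]
        congr 1
        rw [pvStartsRec_run t (i + 1) x hx,
            pvStartsRec_indep _ _ _ (by simpa using pvScanA_rest t (i + 1))]
        exact ih _ (le_trans (pvScanA_len t (i + 1)) (by simpa using Nat.lt_succ_iff.mp (Nat.lt_of_lt_of_le (by simp) hxs))) _

-- ===== VERDICT (by name: the statement is the Claim_ definition above) =====
theorem get_sections_indices_spec : Claim_equal_get_sections_indices := by
  intro lst _
  unfold Spec_get_sections_indices get_sections_indices get_sections_indices_alt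
  rw [PySem.List.slice_from_one, pvStarts_bridge, pvEnds_bridge]
  exact (pvMain lst.length lst le_rfl 0).symm
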